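-- pv_equiv track=rewrite | github.com/parthalon025/ha-aria | aria/shared/day_classifier.py | _classify_single_day
-- ===== SOURCE A (Python) =====
-- def _classify_single_day(
--     is_weekend: bool,
--     summaries: list[str],
--     away: bool,
--     keywords: dict[str, list[str]],
-- ) -> str:
--     """Classify a single day. Priority: vacation > holiday > weekend > wfh > workday.
--
--     Holidays are classified independently even on weekends — the analysis
--     engine handles pooling (merging holidays into weekend pool if <10).
--
--     Args:
--         is_weekend: True for Saturday/Sunday.
--         summaries: Calendar event summaries for this day.
--         away: True if person was away all day.
--         keywords: Dict with "holiday" and "wfh" keyword lists.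
--     """
--     if away:
--         return "vacation"
--
--     holiday_keywords = keywords.get("holiday", [])
--     wfh_keywords = keywords.get("wfh", [])
--
--     has_vacation = False
--     has_holiday = False
--     has_wfh = False
--
--     for summary in summaries:
--         lower = summary.lower()
--         if any(kw in lower for kw in ["vacation", "trip"]):
--             has_vacation = True
--         if any(kw in lower for kw in holiday_keywords):
--             has_holiday = True
--         if any(kw in lower for kw in wfh_keywords):
--             has_wfh = True
--
--     # Priority: vacation > holiday > weekend > wfh > workday
--     if has_vacation:
--         return "vacation"
--     if has_holiday:
--         return "holiday"
--     if is_weekend: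
--         return "weekend"
--     if has_wfh:
--         return "wfh"
--
--     return "workday"
-- ===== SOURCE B (Python) =====
-- def _classify_single_day(
--     is_weekend: bool,
--     summaries: list[str],
--     away: bool,
--     keywords: dict[str, list[str]],
-- ) -> str:
--     """Priority-ordered early-return re-implementation (no mutable flags)."""
--     if away:
--         return "vacation"
--     if any(kw in s.lower() for s in summaries for kw in ("vacation", "trip")):
--         return "vacation"
--     if any(kw in s.lower() for s in summaries for kw in keywords.get("holiday", [])):
--         return "holiday"
--     if is_weekend:
--         return "weekend"
--     if any(kw in s.lower() for s in summaries for kw in keywords.get("wfh", [])):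
--         return "wfh"
--     return "workday"
-- ===== Notes on version B (the rewrite author's own statement) =====
-- stated objective: simpler
-- what changed: Replaced the single loop maintaining three mutable booleans plus a final cascade by a chain of priority-ordered early returns, each a short-circuiting any() scan over the summaries.
import Mathlib
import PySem

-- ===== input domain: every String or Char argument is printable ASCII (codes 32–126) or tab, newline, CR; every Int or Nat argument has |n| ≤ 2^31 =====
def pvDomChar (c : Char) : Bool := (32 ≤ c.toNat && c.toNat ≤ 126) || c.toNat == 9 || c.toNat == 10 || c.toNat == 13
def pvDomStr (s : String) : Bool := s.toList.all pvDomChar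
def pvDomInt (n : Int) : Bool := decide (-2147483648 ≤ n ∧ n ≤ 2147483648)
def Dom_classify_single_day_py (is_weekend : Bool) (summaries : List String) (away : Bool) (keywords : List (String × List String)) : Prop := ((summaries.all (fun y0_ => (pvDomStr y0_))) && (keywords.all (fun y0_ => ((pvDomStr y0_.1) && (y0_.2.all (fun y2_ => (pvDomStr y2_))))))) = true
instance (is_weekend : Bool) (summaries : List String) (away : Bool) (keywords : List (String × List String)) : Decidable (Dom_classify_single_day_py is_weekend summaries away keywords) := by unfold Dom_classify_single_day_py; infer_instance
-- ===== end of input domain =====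

-- B replaces A's single loop with three mutable flags by a chain of priority-ordered
-- early-return any-scans (objective: simpler).

-- ===== PORT A =====
-- literal transliteration of A: one fold over summaries maintaining three flags, then a cascade
def classify_single_day_py (is_weekend : Bool) (summaries : List String) (away : Bool) (keywords : List (String × List String)) : String :=
  if away then "vacation" else
  let holiday_keywords := (PySem.Dict.mk keywords).getD "holiday" []
  let wfh_keywords := (PySem.Dict.mk keywords).getD "wfh" []
  let st := summaries.foldl (fun (acc : Bool × Bool × Bool) summary =>
    let lower := PySem.Str.lower summary
    let hv := if (["vacation", "trip"] : List String).any (fun kw => PySem.Str.isIn kw lower) then true else acc.1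
    let hh := if holiday_keywords.any (fun kw => PySem.Str.isIn kw lower) then true else acc.2.1
    let hw := if wfh_keywords.any (fun kw => PySem.Str.isIn kw lower) then true else acc.2.2
    (hv, hh, hw)) (false, false, false)
  if st.1 then "vacation"
  else if st.2.1 then "holiday"
  else if is_weekend then "weekend"
  else if st.2.2 then "wfh"
  else "workday"

-- ===== PORT B =====
def classify_single_day_py_alt (is_weekend : Bool) (summaries : List String) (away : Bool) (keywords : List (String × List String)) : String :=
  if away then "vacation"
  else if summaries.any (fun s => (["vacation", "trip"] : List String).any (fun kw => PySem.Str.isIn kw (PySem.Str.lower s))) then "vacation"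
  else if summaries.any (fun s => ((PySem.Dict.mk keywords).getD "holiday" []).any (fun kw => PySem.Str.isIn kw (PySem.Str.lower s))) then "holiday"
  else if is_weekend then "weekend"
  else if summaries.any (fun s => ((PySem.Dict.mk keywords).getD "wfh" []).any (fun kw => PySem.Str.isIn kw (PySem.Str.lower s))) then "wfh"
  else "workday"

-- ===== PRECONDITION & SPEC =====
def Spec_classify_single_day_py (is_weekend : Bool) (summaries : List String) (away : Bool) (keywords : List (String × List String)) (out : String) : Prop := out = classify_single_day_py_alt is_weekend summaries away keywords
instance (is_weekend : Bool) (summaries : List String) (away : Bool) (keywords : List (String × List String)) (out : String) : Decidable (Spec_classify_single_day_py is_weekend summaries away keywords out) := by unfold Spec_classify_single_day_py; infer_instance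

-- ===== CLAIM (what is proved, stated in full; the proofs are below) =====
def Claim_equal_classify_single_day_py : Prop := ∀ (is_weekend : Bool) (summaries : List String) (away : Bool) (keywords : List (String × List String)), Dom_classify_single_day_py is_weekend summaries away keywords → Spec_classify_single_day_py is_weekend summaries away keywords (classify_single_day_py is_weekend summaries away keywords)

-- ===== LEMMAS AND PROOFS =====

-- A's fold over the three flags computes the three independent `any`s
theorem foldl_three_flags (p1 p2 p3 : String → Bool) (l : List String) (a : Bool × Bool × Bool) :
    l.foldl (fun (acc : Bool × Bool × Bool) s =>
      ((if p1 s then true else acc.1),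
       (if p2 s then true else acc.2.1),
       (if p3 s then true else acc.2.2))) a
    = (a.1 || l.any p1, a.2.1 || l.any p2, a.2.2 || l.any p3) := by
  induction l generalizing a with
  | nil => simp
  | cons x xs ih =>
    simp only [List.foldl_cons, ih, List.any_cons]
    obtain ⟨a1, a2, a3⟩ := a
    by_cases h1 : p1 x <;> by_cases h2 : p2 x <;> by_cases h3 : p3 x <;>
      simp [h1, h2, h3]

-- ===== VERDICT (by name: the statement is the Claim_ definition above) =====
theorem classify_single_day_py_spec : Claim_equal_classify_single_day_py := by
  intro is_weekend summaries away keywords _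
  unfold Spec_classify_single_day_py classify_single_day_py classify_single_day_py_alt
  by_cases ha : away
  · simp [ha]
  · simp only [ha, if_false, Bool.false_eq_true]
    rw [foldl_three_flags]
    simp
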